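-- pv_equiv track=rewrite | github.com/E5t3BAN/prueba-t-cnica-RPA- | ejercicio_3.py | agrupacionNumeros
-- ===== SOURCE A (Python) =====
-- def agrupacionNumeros(lista):
--     conjuntos={}  #diccionario para almacenar los elementos
--     for numeros in lista:
--         if numeros in conjuntos:
--             conjuntos[numeros].append(numeros)
--         else:
--             conjuntos[numeros] = [numeros]
--
--     matriz= list(conjuntos.values())
--     return matriz
-- ===== SOURCE B (Python) =====
-- def agrupacionNumeros(lista):
--     # no dict: collect distinct keys in first-occurrence order, then
--     # build each group by a full filtering scan of the list per key
--     claves = []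
--     for n in lista:
--         if n not in claves:
--             claves.append(n)
--     return [[x for x in lista if x == n] for n in claves]
-- ===== Notes on version B (the rewrite author's own statement) =====
-- stated objective: alternative
-- what changed: Drops the dict entirely: B first dedupes the list into its distinct keys in first-occurrence order, then builds each group by a separate filtering scan of the whole list per key, instead of A's single pass appending into per-key dict buckets.
import Mathlib
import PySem

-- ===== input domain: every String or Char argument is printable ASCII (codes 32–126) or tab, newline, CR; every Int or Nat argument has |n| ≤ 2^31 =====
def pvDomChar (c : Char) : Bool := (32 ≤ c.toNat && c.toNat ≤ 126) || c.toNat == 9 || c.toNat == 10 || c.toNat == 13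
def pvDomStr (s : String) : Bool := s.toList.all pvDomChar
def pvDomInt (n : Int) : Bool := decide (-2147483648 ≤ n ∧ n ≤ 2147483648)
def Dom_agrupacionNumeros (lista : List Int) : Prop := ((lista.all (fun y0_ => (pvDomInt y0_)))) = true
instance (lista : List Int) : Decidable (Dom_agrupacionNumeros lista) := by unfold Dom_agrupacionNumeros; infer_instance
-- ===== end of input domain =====

-- B drops A's dict entirely: it dedupes the list into its distinct keys in
-- first-occurrence order, then builds each group by a filtering scan per key
-- (alternative decomposition; not faster).

-- ===== PORT A =====
def agrupacionNumeros (lista : List Int) : List (List Int) :=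
  let conjuntos := lista.foldl
    (fun conjuntos numeros =>
      if conjuntos.contains numeros then
        conjuntos.modify numeros [] (· ++ [numeros])
      else
        conjuntos.insert numeros [numeros])
    PySem.Dict.empty
  conjuntos.values

-- ===== PORT B =====
def agrupacionNumeros_alt (lista : List Int) : List (List Int) :=
  let claves := lista.foldl (fun claves n => if claves.contains n then claves else claves ++ [n]) ([] : List Int)
  claves.map (fun n => lista.filter (fun x => x == n))

-- ===== PRECONDITION & SPEC =====
def Spec_agrupacionNumeros (lista : List Int) (out : List (List Int)) : Prop := out = agrupacionNumeros_alt lista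
instance (lista : List Int) (out : List (List Int)) : Decidable (Spec_agrupacionNumeros lista out) := by unfold Spec_agrupacionNumeros; infer_instance

-- ===== CLAIM (what is proved, stated in full; the proofs are below) =====
def Claim_equal_agrupacionNumeros : Prop := ∀ (lista : List Int), Dom_agrupacionNumeros lista → Spec_agrupacionNumeros lista (agrupacionNumeros lista)

-- ===== LEMMAS AND PROOFS =====

-- A's loop body (the contains-branch) is exactly Python's d.modify on every dict.
theorem stepA_eq_modify (d : PySem.Dict Int (List Int)) (x : Int) :
    (if d.contains x then d.modify x [] (· ++ [x]) else d.insert x [x]) =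
      d.modify x [] (· ++ [x]) := by
  split_ifs with h
  · rfl
  · have h' : d.contains x = false := by simpa using h
    simp [PySem.Dict.modify, PySem.Dict.insert, h', PySem.Dict.getD_of_not_contains (h := h')]

-- A's dict maps each key c to the c-group, i.e. [c] * count(c).
theorem getD_groupDict (lista : List Int) (c : Int) :
    (lista.foldl (fun d x => d.modify x [] (· ++ [x])) PySem.Dict.empty).getD c [] =
      List.replicate (lista.count c) c := by
  have hmap : lista.foldl (fun d x => d.modify x [] (· ++ [x])) PySem.Dict.empty =
      (lista.map (fun x => (x, x))).foldl (fun d p => d.modify p.1 [] (· ++ [p.2]))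
        PySem.Dict.empty := by
    rw [List.foldl_map]
  rw [hmap, PySem.Dict.getD_foldl_modify_append]
  have hfilter : ((lista.map (fun x => (x, x))).filter (fun p => p.1 == c)) =
      (lista.filter (fun x => x == c)).map (fun x => (x, x)) := by
    rw [List.filter_map]; rfl
  rw [hfilter]
  simp [List.filter_beq (a := c) (l := lista)]

-- B's first loop is exactly set(lista) in first-occurrence order.
theorem claves_eq_ofList (lista : List Int) :
    lista.foldl (fun claves n => if claves.contains n then claves else claves ++ [n])
      ([] : List Int) = PySem.Set.ofList lista := rfl

theorem agrupacionNumeros_eq (lista : List Int) :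
    agrupacionNumeros lista = agrupacionNumeros_alt lista := by
  unfold agrupacionNumeros agrupacionNumeros_alt
  have hstep : (fun (d : PySem.Dict Int (List Int)) (x : Int) =>
      if d.contains x then d.modify x [] (· ++ [x]) else d.insert x [x]) =
      (fun d x => d.modify x [] (· ++ [x])) := by
    funext d x; exact stepA_eq_modify d x
  rw [hstep]
  have hnd : (lista.foldl (fun d x => d.modify x [] (· ++ [x]))
      PySem.Dict.empty).keys.Nodup := by
    rw [PySem.Dict.keys_foldl_modify]
    exact PySem.Set.nodup_ofList lista
  rw [PySem.Dict.values_eq_map_keys _ hnd [], PySem.Dict.keys_foldl_modify,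
    claves_eq_ofList]
  have hupd : PySem.Set.update (PySem.Dict.empty : PySem.Dict Int (List Int)).keys lista = PySem.Set.ofList lista := rfl
  rw [hupd]
  refine List.map_congr_left (fun k _ => ?_)
  rw [getD_groupDict, List.filter_beq]

-- ===== VERDICT (by name: the statement is the Claim_ definition above) =====
theorem agrupacionNumeros_spec : Claim_equal_agrupacionNumeros := by
  intro lista _
  exact agrupacionNumeros_eq lista
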